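-- pv_equiv track=rewrite | github.com/TiramisuAddict/PI-3A-Web | ml/demande_adaptive_model.py | find_token_sequences
-- ===== SOURCE A (Python) =====
-- def find_token_sequences(haystack: list[str], needle: list[str]) -> list[int]:
--     if not haystack or not needle or len(needle) > len(haystack):
--         return []
--     matches: list[int] = []
--     width = len(needle)
--     for index in range(0, len(haystack) - width + 1):
--         if haystack[index:index + width] == needle:
--             matches.append(index)
--     return matches
-- ===== SOURCE B (Python) =====
-- def find_token_sequences(haystack: list[str], needle: list[str]) -> list[int]:
--     if not needle:
--         return []
--     return [pos for pos in range(len(haystack)) if _starts_at(haystack, needle, pos)]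
--
--
-- def _starts_at(haystack: list[str], needle: list[str], pos: int) -> bool:
--     j = pos
--     for token in needle:
--         if j >= len(haystack) or haystack[j] != token:
--             return False
--         j += 1
--     return True
-- ===== Notes on version B (the rewrite author's own statement) =====
-- stated objective: alternative
-- what changed: Replaces A's slice-and-compare over a length-guarded index range by a comprehension over all start positions with a token-by-token prefix test that exits at the first mismatch and needs no slice allocation and no up-front length guards.
import Mathlib
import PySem

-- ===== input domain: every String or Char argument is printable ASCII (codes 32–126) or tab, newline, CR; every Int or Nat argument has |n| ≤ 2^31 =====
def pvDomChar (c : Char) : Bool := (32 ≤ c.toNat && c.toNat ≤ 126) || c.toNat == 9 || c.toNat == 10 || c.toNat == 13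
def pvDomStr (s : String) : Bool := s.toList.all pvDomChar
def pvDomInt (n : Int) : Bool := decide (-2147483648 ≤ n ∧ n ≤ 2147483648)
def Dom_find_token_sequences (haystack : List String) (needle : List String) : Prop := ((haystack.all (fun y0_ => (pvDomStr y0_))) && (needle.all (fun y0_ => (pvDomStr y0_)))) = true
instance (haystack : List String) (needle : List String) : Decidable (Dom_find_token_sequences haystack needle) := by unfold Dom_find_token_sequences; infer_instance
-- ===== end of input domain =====

-- B drops A's up-front length guards and per-position slice building in favour of a
-- token-by-token prefix test with early exit over every start position (objective: alternative).

-- ===== PORT A =====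
def find_token_sequences (haystack : List String) (needle : List String) : List Int :=
  if haystack = [] ∨ needle = [] ∨ needle.length > haystack.length then []
  else
    -- for index in range(0, len(haystack) - width + 1): if haystack[index:index+width] == needle: matches.append(index)
    (PySem.List.pyRange 0 ((haystack.length : Int) - (needle.length : Int) + 1) 1).foldl
      (fun ms index =>
        if PySem.List.slice haystack (some index) (some (index + (needle.length : Int))) = needle
        then ms ++ [index] else ms) []

-- ===== PORT B =====
-- _starts_at: walk the needle with a running index j; `haystack[j]? = some token`
-- fuses Python's `j >= len(haystack) or haystack[j] != token` bound-plus-equality test.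
def startsAt (haystack : List String) : List String → Nat → Bool
  | [], _ => true
  | token :: rest, j =>
      if haystack[j]? = some token then startsAt haystack rest (j + 1) else false

def find_token_sequences_alt (haystack : List String) (needle : List String) : List Int :=
  if needle = [] then []
  else ((List.range haystack.length).filter (fun pos => startsAt haystack needle pos)).map
        (fun pos => Int.ofNat pos)

-- ===== PRECONDITION & SPEC =====
def Spec_find_token_sequences (haystack : List String) (needle : List String) (out : List Int) : Prop := out = find_token_sequences_alt haystack needle
instance (haystack : List String) (needle : List String) (out : List Int) : Decidable (Spec_find_token_sequences haystack needle out) := by unfold Spec_find_token_sequences; infer_instance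

-- ===== CLAIM (what is proved, stated in full; the proofs are below) =====
def Claim_equal_find_token_sequences : Prop := ∀ (haystack : List String) (needle : List String), Dom_find_token_sequences haystack needle → Spec_find_token_sequences haystack needle (find_token_sequences haystack needle)

-- ===== LEMMAS AND PROOFS =====

-- startsAt is the take/compare window test
theorem startsAt_eq (h : List String) (n : List String) (j : Nat) :
    startsAt h n j = decide ((h.drop j).take n.length = n) := by
  induction n generalizing j with
  | nil => simp [startsAt]
  | cons tok rest ih =>
    by_cases hj : j < h.length
    · rw [List.drop_eq_getElem_cons hj] at *
      simp only [startsAt, List.length_cons, List.take_succ_cons, List.getElem?_eq_getElem hj,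
        Option.some.injEq]
      by_cases he : h[j] = tok
      · simp [he, ih]
      · simp only [if_neg he]
        symm
        simp only [decide_eq_false_iff_not]
        intro hc
        exact he (List.cons.injEq .. ▸ hc).1
    · have hle : h.length ≤ j := Nat.le_of_not_lt hj
      simp [startsAt, List.getElem?_eq_none hle, List.drop_of_length_le hle]

-- positions whose window runs past the end never match
theorem startsAt_false_of_overrun (h : List String) (n : List String) (pos : Nat)
    (hnl : 0 < n.length) (hover : h.length < pos + n.length) :
    startsAt h n pos = false := by
  rw [startsAt_eq]
  simp only [decide_eq_false_iff_not]
  intro hc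
  have hlen := congrArg List.length hc
  rw [List.length_take, List.length_drop] at hlen
  have h2 : n.length ≤ h.length - pos := min_eq_left_iff.mp hlen
  omega

-- B's filter over all positions can be cut back to A's guarded range
theorem filter_range_shrink (h : List String) (n : List String)
    (hnl : 0 < n.length) (hm : n.length ≤ h.length) :
    (List.range h.length).filter (fun pos => startsAt h n pos)
      = (List.range (h.length - n.length + 1)).filter (fun pos => startsAt h n pos) := by
  have hL : h.length = (h.length - n.length + 1) + (n.length - 1) := by omega
  conv_lhs => rw [hL]
  rw [List.range_add, List.filter_append]
  have hnil : ((List.range (n.length - 1)).map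
      (fun x => (h.length - n.length + 1) + x)).filter (fun pos => startsAt h n pos) = [] := by
    apply List.filter_eq_nil_iff.mpr
    intro pos hpos
    obtain ⟨k, hk, hkeq⟩ := List.mem_map.mp hpos
    have hkr := List.mem_range.mp hk
    simp only [Bool.not_eq_true]
    rw [← hkeq]
    exact startsAt_false_of_overrun h n _ hnl (by omega)
  rw [hnil, List.append_nil]

theorem main_eq (h : List String) (n : List String) :
    find_token_sequences h n = find_token_sequences_alt h n := by
  by_cases hn : n = []
  · simp [find_token_sequences, find_token_sequences_alt, hn]
  · have hnl : 0 < n.length := List.length_pos_iff.mpr hn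
    by_cases hml : n.length > h.length
    · -- A's guard fires; B's filter is empty since every window overruns
      have hb : find_token_sequences_alt h n = [] := by
        unfold find_token_sequences_alt
        rw [if_neg hn]
        have hnil : (List.range h.length).filter (fun pos => startsAt h n pos) = [] := by
          apply List.filter_eq_nil_iff.mpr
          intro pos hpos
          have hlt : pos < h.length := List.mem_range.mp hpos
          simp only [Bool.not_eq_true]
          exact startsAt_false_of_overrun h n pos hnl (by omega)
        rw [hnil]; rfl
      rw [hb]
      unfold find_token_sequences
      rw [if_pos (Or.inr (Or.inr hml))]
    · have hm : n.length ≤ h.length := Nat.le_of_not_lt hml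
      have hh : h ≠ [] := by
        intro hc; subst hc
        simp only [List.length_nil] at hm; omega
      unfold find_token_sequences find_token_sequences_alt
      rw [if_neg (fun hc => hc.elim hh (fun hc2 => hc2.elim hn hml)), if_neg hn]
      rw [PySem.List.foldl_append_ite_eq_filter
        (fun index => PySem.List.slice h (some index) (some (index + (n.length : Int))) = n)]
      rw [List.nil_append, PySem.List.pyRange_one, List.filter_map]
      have hcast : ((h.length : Int) - (n.length : Int) + 1 - 0).toNat
          = h.length - n.length + 1 := by omega
      rw [hcast, filter_range_shrink h n hnl hm]
      have hfil : (List.range (h.length - n.length + 1)).filter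
            ((fun index => decide (PySem.List.slice h (some index)
                (some (index + (n.length : Int))) = n)) ∘ (fun k : Nat => (0 : Int) + k))
          = (List.range (h.length - n.length + 1)).filter (fun pos => startsAt h n pos) := by
        apply List.filter_congr
        intro pos _
        simp only [Function.comp_apply, zero_add]
        rw [startsAt_eq, PySem.List.slice_natCast_add h pos n.length]
      rw [hfil]
      simp [Int.ofNat_eq_natCast]

-- ===== VERDICT (by name: the statement is the Claim_ definition above) =====
theorem find_token_sequences_spec : Claim_equal_find_token_sequences := by
  intro haystack needle _
  unfold Spec_find_token_sequences
  exact main_eq haystack needle
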